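-- pv_equiv track=rewrite | github.com/orestxherija/CompLx-FinSim4-ESG | preprocessing.py | add_space_around_comma
-- ===== SOURCE A (Python) =====
-- def add_space_around_comma(doc: str) -> str:
--     """
--     Add a space around commas, unless they are digit separators
--     """
--     n = len(doc)
--     new_doc = ""
--     for i, c in enumerate(doc):
--         if c != ",":
--             new_doc += c
--         else:
--             if i == 0 or i == n - 1:
--                 new_doc += ""
--             else:
--                 if doc[i-1].isdigit() and doc[i+1].isdigit():
--                     new_doc += c
--                 else:
--                     new_doc += " " + c + " "
--     return new_doc
-- ===== SOURCE B (Python) =====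
-- def add_space_around_comma(doc: str) -> str:
--     parts = doc.split(',')
--     pieces = [parts[0]]
--     for j in range(1, len(parts)):
--         left, right = parts[j - 1], parts[j]
--         if (j == 1 and left == '') or (j == len(parts) - 1 and right == ''):
--             sep = ''
--         elif left and right and left[-1].isdigit() and right[0].isdigit():
--             sep = ','
--         else:
--             sep = ' , '
--         pieces.append(sep)
--         pieces.append(right)
--     return ''.join(pieces)
-- ===== Notes on version B (the rewrite author's own statement) =====
-- stated objective: faster
-- what changed: B replaces A's per-character scan (with neighbour index lookups at each comma) by a split-on-comma then join pass: str.split yields the comma-free segments, a loop over adjacent segment pairs chooses each joiner from the segments' own end characters, and str.join assembles the result.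
import Mathlib
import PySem

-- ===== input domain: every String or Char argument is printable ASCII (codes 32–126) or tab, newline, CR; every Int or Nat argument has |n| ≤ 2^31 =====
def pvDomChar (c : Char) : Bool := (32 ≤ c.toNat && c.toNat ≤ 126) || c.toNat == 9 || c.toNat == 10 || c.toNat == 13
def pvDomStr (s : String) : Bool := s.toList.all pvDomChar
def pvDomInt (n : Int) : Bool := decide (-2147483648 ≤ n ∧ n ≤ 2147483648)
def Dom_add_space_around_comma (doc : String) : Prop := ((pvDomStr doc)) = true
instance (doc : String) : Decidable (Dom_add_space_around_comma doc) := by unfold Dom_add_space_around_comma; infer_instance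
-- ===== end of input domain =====

-- B replaces A's per-character scan with neighbour index lookups by a split-on-comma /
-- join-with-computed-separators pass over the comma-free segments (objective: faster, measured).

-- ===== PORT A =====
-- the body of A's 'for i, c in enumerate(doc)' loop
def pvStepA (l : List Char) (n : Int) (new_doc : List Char) (ic : Int × Char) : List Char :=
  if ic.2 ≠ ',' then new_doc ++ [ic.2]
  else if ic.1 = 0 ∨ ic.1 = n - 1 then new_doc ++ []
  else if PySem.Chars.isdigit (PySem.List.pyGetD l (ic.1 - 1) ' ')
          && PySem.Chars.isdigit (PySem.List.pyGetD l (ic.1 + 1) ' ') then new_doc ++ [ic.2]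
  else new_doc ++ ([' '] ++ [ic.2] ++ [' '])

def add_space_around_comma (doc : String) : String :=
  let l := doc.toList
  let n : Int := PySem.Str.len doc
  String.ofList ((PySem.List.enumerate l 0).foldl (pvStepA l n) [])

-- ===== PORT B =====
-- B's joiner for the boundary j between parts[j-1] (= left) and parts[j] (= right)
def pvSepB (nparts j : Int) (left right : List Char) : List Char :=
  if (j = 1 ∧ left = []) ∨ (j = nparts - 1 ∧ right = []) then []
  else if left ≠ [] ∧ right ≠ [] ∧ PySem.Chars.isdigit (PySem.List.pyGetD left (-1) ' ') = true
          ∧ PySem.Chars.isdigit (PySem.List.pyGetD right 0 ' ') = true then [',']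
  else [' ', ',', ' ']

-- B's 'for j in range(1, len(parts))' loop; ''.join of the appended pieces is concatenation
def pvBGo (nparts : Int) : Int → List Char → List (List Char) → List Char
  | _, _, [] => []
  | j, left, right :: rs => pvSepB nparts j left right ++ right ++ pvBGo nparts (j + 1) right rs

def add_space_around_comma_alt (doc : String) : String :=
  let parts := PySem.Chars.splitOn doc.toList [','];
  match parts with
  | [] => ""   -- unreachable: str.split never returns an empty list
  | p0 :: rest => String.ofList (p0 ++ pvBGo ((rest.length : Int) + 1) 1 p0 rest)

-- ===== PRECONDITION & SPEC =====
def Spec_add_space_around_comma (doc : String) (out : String) : Prop := out = add_space_around_comma_alt doc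
instance (doc : String) (out : String) : Decidable (Spec_add_space_around_comma doc out) := by unfold Spec_add_space_around_comma; infer_instance

-- ===== CLAIM (what is proved, stated in full; the proofs are below) =====
def Claim_equal_add_space_around_comma : Prop := ∀ (doc : String), Dom_add_space_around_comma doc → Spec_add_space_around_comma doc (add_space_around_comma doc)

-- ===== LEMMAS AND PROOFS =====

-- A's fold, rewritten as an indexed recursion over the suffix
def pvRepl (l : List Char) (n : Int) (i : Int) : List Char :=
  if i = 0 ∨ i = n - 1 then []
  else if PySem.Chars.isdigit (PySem.List.pyGetD l (i - 1) ' ')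
          && PySem.Chars.isdigit (PySem.List.pyGetD l (i + 1) ' ') then [',']
  else [' ', ',', ' ']

def pvReSub (l : List Char) (n : Int) : Int → List Char → List Char
  | _, [] => []
  | i, c :: cs =>
    if c = ',' then pvRepl l n i ++ pvReSub l n (i + 1) cs
    else c :: pvReSub l n (i + 1) cs

lemma stepA_comma (l : List Char) (n i : Int) (acc : List Char) :
    pvStepA l n acc (i, ',') = acc ++ pvRepl l n i := by
  unfold pvStepA pvRepl
  split_ifs <;> simp_all

lemma foldl_stepA_eq_reSub (l : List Char) (n : Int) :
    ∀ (suf : List Char) (i : Int) (acc : List Char),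
      (PySem.List.enumerate suf i).foldl (pvStepA l n) acc
        = acc ++ pvReSub l n i suf := by
  intro suf
  induction suf with
  | nil => intro i acc; simp [PySem.List.enumerate, pvReSub]
  | cons c cs ih =>
    intro i acc
    rw [PySem.List.enumerate_cons, List.foldl_cons, ih]
    by_cases hc : c = ','
    · subst hc
      rw [stepA_comma]
      simp [pvReSub]
    · simp [pvStepA, pvReSub, hc]

-- local (neighbour-carrying) semantics shared by both programs
def pvSpecGo : Option Char → List Char → List Char
  | _, [] => []
  | prev, c :: rest =>
    if c = ',' then
      (if prev = none ∨ rest = [] then []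
       else if PySem.Chars.isdigit (prev.getD ' ') && PySem.Chars.isdigit (rest.headD ' ') then [',']
       else [' ', ',', ' ']) ++ pvSpecGo (some ',') rest
    else c :: pvSpecGo (some c) rest

lemma pyGetD_idx (l : List Char) (i : Nat) (h : i < l.length) :
    PySem.List.pyGetD l (i : Int) ' ' = l[i] := by
  rw [PySem.List.pyGetD_natCast]
  simp [List.getD_eq_getElem?_getD, List.getElem?_eq_getElem h]

lemma pyGetD_neg_one (l : List Char) (h : l ≠ []) :
    PySem.List.pyGetD l (-1) ' ' = l.getLastD ' ' := by
  have hl : 0 < l.length := List.length_pos_iff.mpr h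
  simp only [PySem.List.pyGetD, PySem.List.pyGet?, PySem.List.pyIdx?]
  rw [if_neg (by omega), if_pos (by omega : -(l.length : Int) ≤ -1)]
  simp only [Option.bind_some]
  rw [List.getElem?_eq_getElem (by omega), List.getLastD_eq_getLast?, List.getLast?_eq_getElem?,
      List.getElem?_eq_getElem (by omega)]
  simp

lemma pyGetD_zero (l : List Char) (h : l ≠ []) :
    PySem.List.pyGetD l 0 ' ' = l.headD ' ' := by
  cases l with
  | nil => simp at h
  | cons a t => simp [PySem.List.pyGetD, PySem.List.pyGet?, PySem.List.pyIdx?]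

lemma reSub_eq_specGo (l : List Char) :
    ∀ (suf : List Char) (i : Int), 0 ≤ i → l.drop i.toNat = suf →
      pvReSub l (l.length : Int) i suf
        = pvSpecGo (if i = 0 then none else some (PySem.List.pyGetD l (i - 1) ' ')) suf := by
  intro suf
  induction suf with
  | nil => intro i _ _; simp [pvReSub, pvSpecGo]
  | cons c rest ih =>
    intro i hi hdrop
    have hlen : i.toNat < l.length := by
      by_contra hge
      rw [List.drop_eq_nil_of_le (by omega)] at hdrop
      exact List.cons_ne_nil c rest hdrop.symm
    have hget? : l[i.toNat]? = some c := by
      rw [← List.head?_drop, hdrop]; rfl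
    have hget : l[i.toNat] = c := by
      rw [List.getElem?_eq_getElem hlen] at hget?
      exact Option.some.inj hget?
    have htn : (i + 1).toNat = i.toNat + 1 := by omega
    have hdrop' : l.drop (i + 1).toNat = rest := by
      rw [htn, ← List.drop_drop]
      simp [hdrop]
    have hlenlist : i.toNat + 1 + rest.length = l.length := by
      have := congrArg List.length hdrop
      simp at this
      omega
    have hrec := ih (i + 1) (by omega) hdrop'
    have hprev1 : (i + 1 : Int) ≠ 0 := by omega
    have hgetDi : PySem.List.pyGetD l ((i + 1) - 1) ' ' = c := by
      have : ((i + 1 : Int) - 1) = (i.toNat : Int) := by omega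
      rw [this, pyGetD_idx l i.toNat hlen, hget]
    by_cases hc : c = ','
    · subst hc
      rw [pvReSub, if_pos rfl, pvSpecGo, if_pos rfl, hrec, if_neg hprev1, hgetDi]
      congr 1
      unfold pvRepl
      have hedge : (i = 0 ∨ i = (l.length : Int) - 1) ↔
          ((if i = 0 then (none : Option Char) else some (PySem.List.pyGetD l (i - 1) ' ')) = none ∨ rest = []) := by
        constructor
        · rintro (h0 | hlast)
          · left; simp [h0]
          · right
            have : rest.length = 0 := by omega
            exact List.eq_nil_of_length_eq_zero this
        · rintro (hnone | hnil)
          · left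
            by_cases h0 : i = 0
            · exact h0
            · simp [h0] at hnone
          · right
            subst hnil
            simp at hlenlist
            omega
      by_cases he : i = 0 ∨ i = (l.length : Int) - 1
      · rw [if_pos he, if_pos (hedge.mp he)]
      · rw [if_neg he, if_neg (fun h => he (hedge.mpr h))]
        have h0 : i ≠ 0 := fun h => he (Or.inl h)
        have hrest : rest ≠ [] := by
          intro h
          exact he (hedge.mpr (Or.inr h))
        have hheadget : PySem.List.pyGetD l (i + 1) ' ' = rest.headD ' ' := by
          cases rest with
          | nil => exact absurd rfl hrest
          | cons r rs =>
            have hg? : l[(i + 1).toNat]? = some r := by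
              rw [← List.head?_drop, hdrop']; rfl
            have hlt : (i + 1).toNat < l.length := by omega
            have hg : l[(i + 1).toNat] = r := by
              rw [List.getElem?_eq_getElem hlt] at hg?
              exact Option.some.inj hg?
            have hcast : ((i + 1).toNat : Int) = i + 1 := by omega
            rw [← hcast, pyGetD_idx l (i + 1).toNat hlt, hg]
            rfl
        rw [hheadget]
        simp [h0]
    · rw [pvReSub, if_neg hc, pvSpecGo, if_neg hc, hrec, if_neg hprev1, hgetDi]

-- proof-side split of l on ',' (head = first comma-free segment)
def pvSplitP : List Char → List (List Char)
  | [] => [[]]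
  | c :: rest =>
    if c = ',' then [] :: pvSplitP rest
    else match pvSplitP rest with
      | [] => [[c]]
      | p :: ps => (c :: p) :: ps

lemma splitP_ne_nil (l : List Char) : pvSplitP l ≠ [] := by
  cases l with
  | nil => simp [pvSplitP]
  | cons c rest =>
    unfold pvSplitP
    split_ifs
    · simp
    · cases h : pvSplitP rest <;> simp

lemma splitP_singleton_iff (l : List Char) : pvSplitP l = [[]] ↔ l = [] := by
  constructor
  · intro h
    cases l with
    | nil => rfl
    | cons c rest =>
      exfalso
      unfold pvSplitP at h
      split_ifs at h with hc
      · simp at h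
        exact splitP_ne_nil rest h
      · cases hr : pvSplitP rest <;> simp [hr] at h
  · intro h; subst h; rfl

-- tail recursion of PySem.Chars.splitOn, specialised to sep = [',']
def pvSplit1 : List Char → List Char → List (List Char)
  | cur, [] => [cur.reverse]
  | cur, c :: rest => if c = ',' then cur.reverse :: pvSplit1 [] rest else pvSplit1 (c :: cur) rest

lemma splitOn_go_eq (fuel : Nat) :
    ∀ (l cur : List Char) (acc : List (List Char)), l.length < fuel →
      PySem.Chars.splitOn.go [','] fuel l cur acc = acc.reverse ++ pvSplit1 cur l := by
  induction fuel with
  | zero => intro l cur acc h; omega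
  | succ f ih =>
    intro l cur acc h
    cases l with
    | nil => simp [PySem.Chars.splitOn.go, pvSplit1]
    | cons c rest =>
      by_cases hc : c = ','
      · subst hc
        rw [show PySem.Chars.splitOn.go [','] (f + 1) (',' :: rest) cur acc
              = PySem.Chars.splitOn.go [','] f rest [] (cur.reverse :: acc) by
            simp [PySem.Chars.splitOn.go, List.isPrefixOf]]
        rw [ih rest [] (cur.reverse :: acc) (by simpa using Nat.lt_of_succ_lt_succ h)]
        simp [pvSplit1]
      · rw [show PySem.Chars.splitOn.go [','] (f + 1) (c :: rest) cur acc
              = PySem.Chars.splitOn.go [','] f rest (c :: cur) acc by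
            simp [PySem.Chars.splitOn.go, List.isPrefixOf, Ne.symm hc]]
        rw [ih rest (c :: cur) acc (by simpa using Nat.lt_of_succ_lt_succ h)]
        simp [pvSplit1, hc]

lemma split1_eq_splitP (l : List Char) :
    ∀ cur : List Char, pvSplit1 cur l = (cur.reverse ++ (pvSplitP l).headD []) :: (pvSplitP l).tail := by
  induction l with
  | nil => intro cur; simp [pvSplit1, pvSplitP]
  | cons c rest ih =>
    intro cur
    by_cases hc : c = ','
    · subst hc
      rw [show pvSplit1 cur (',' :: rest) = cur.reverse :: pvSplit1 [] rest from rfl, ih []]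
      cases hr : pvSplitP rest with
      | nil => exact absurd hr (splitP_ne_nil rest)
      | cons p ps => simp [pvSplitP, hr]
    · rw [show pvSplit1 cur (c :: rest) = pvSplit1 (c :: cur) rest by simp [pvSplit1, hc], ih (c :: cur)]
      cases hr : pvSplitP rest with
      | nil => exact absurd hr (splitP_ne_nil rest)
      | cons p ps => simp [pvSplitP, hc, hr]

lemma splitOn_eq_splitP (l : List Char) :
    PySem.Chars.splitOn l [','] = ((pvSplitP l).headD []) :: (pvSplitP l).tail := by
  unfold PySem.Chars.splitOn
  rw [splitOn_go_eq (l.length + 1) l [] [] (by omega)]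
  simpa using split1_eq_splitP l []

-- the char before the comma after segment p, given the char context `prev` before p
def pvPrevAt (prev : Option Char) (p : List Char) : Option Char :=
  if p = [] then prev else some (p.getLastD ' ')

-- boundary semantics over the remaining segments (prev = char before the upcoming comma)
def pvK : Option Char → List (List Char) → List Char
  | _, [] => []
  | prev, right :: rs =>
    (if prev = none ∨ (right = [] ∧ rs = []) then []
     else if PySem.Chars.isdigit (prev.getD ' ') && PySem.Chars.isdigit (right.headD ',') then [',']
     else [' ', ',', ' ']) ++ right ++ pvK (pvPrevAt (some ',') right) rs

lemma specGo_eq_splitP_K (l : List Char) :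
    ∀ prev : Option Char,
      pvSpecGo prev l
        = (pvSplitP l).headD [] ++ pvK (pvPrevAt prev ((pvSplitP l).headD [])) (pvSplitP l).tail := by
  induction l with
  | nil => intro prev; simp [pvSpecGo, pvSplitP, pvK]
  | cons c rest ih =>
    intro prev
    cases hr : pvSplitP rest with
    | nil => exact absurd hr (splitP_ne_nil rest)
    | cons p1 ps1 =>
      by_cases hc : c = ','
      · subst hc
        rw [show pvSpecGo prev (',' :: rest)
              = (if prev = none ∨ rest = [] then []
                 else if PySem.Chars.isdigit (prev.getD ' ') && PySem.Chars.isdigit (rest.headD ' ') then [',']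
                 else [' ', ',', ' ']) ++ pvSpecGo (some ',') rest from rfl, ih (some ',')]
        rw [show pvSplitP (',' :: rest) = [] :: pvSplitP rest from rfl, hr]
        simp only [List.headD_cons, List.tail_cons, List.nil_append]
        rw [show pvPrevAt prev [] = prev from by simp [pvPrevAt]]
        rw [show pvK prev (p1 :: ps1)
              = (if prev = none ∨ (p1 = [] ∧ ps1 = []) then []
                 else if PySem.Chars.isdigit (prev.getD ' ') && PySem.Chars.isdigit (p1.headD ',') then [',']
                 else [' ', ',', ' ']) ++ p1 ++ pvK (pvPrevAt (some ',') p1) ps1 from rfl]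
        have hre : (rest = []) ↔ (p1 = [] ∧ ps1 = []) := by
          constructor
          · intro h; subst h
            simp [pvSplitP] at hr
            simp_all
          · rintro ⟨h1, h2⟩
            subst h1; subst h2
            exact (splitP_singleton_iff rest).mp hr
        have hhd : rest ≠ [] → rest.headD ' ' = p1.headD ',' := by
          intro hne
          cases rest with
          | nil => exact absurd rfl hne
          | cons d ds =>
            by_cases hd : d = ','
            · subst hd
              simp [pvSplitP] at hr
              simp [hr.1]
            · unfold pvSplitP at hr
              rw [if_neg hd] at hr
              cases hds : pvSplitP ds with
              | nil => exact absurd hds (splitP_ne_nil ds)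
              | cons q qs =>
                rw [hds] at hr
                simp at hr
                simp [← hr.1]
        have hsep : (if prev = none ∨ rest = [] then ([] : List Char)
             else if PySem.Chars.isdigit (prev.getD ' ') && PySem.Chars.isdigit (rest.headD ' ') then [',']
             else [' ', ',', ' '])
            = (if prev = none ∨ (p1 = [] ∧ ps1 = []) then []
             else if PySem.Chars.isdigit (prev.getD ' ') && PySem.Chars.isdigit (p1.headD ',') then [',']
             else [' ', ',', ' ']) := by
          by_cases hedge : prev = none ∨ rest = []
          · rw [if_pos hedge, if_pos (by
              rcases hedge with h | h
              · exact Or.inl h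
              · exact Or.inr (hre.mp h))]
          · have hne : rest ≠ [] := fun h => hedge (Or.inr h)
            have hedge' : ¬ (prev = none ∨ (p1 = [] ∧ ps1 = [])) := by
              rintro (h | h)
              · exact hedge (Or.inl h)
              · exact hedge (Or.inr (hre.mpr h))
            rw [hhd hne, if_neg hedge, if_neg hedge']
        rw [hsep]
        simp
      · rw [show pvSpecGo prev (c :: rest) = c :: pvSpecGo (some c) rest by simp [pvSpecGo, hc], ih (some c)]
        rw [show pvSplitP (c :: rest) = match pvSplitP rest with
              | [] => [[c]]
              | p :: ps => (c :: p) :: ps by simp [pvSplitP, hc], hr]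
        simp only [List.headD_cons, List.tail_cons]
        have hpa : pvPrevAt (some c) p1 = pvPrevAt prev (c :: p1) := by
          cases p1 with
          | nil => simp [pvPrevAt]
          | cons q qs => simp [pvPrevAt]
        rw [hpa]
        simp

lemma BGo_eq_K (nparts : Int) :
    ∀ (rs : List (List Char)) (j : Int) (left : List Char), 1 ≤ j → j + (rs.length : Int) = nparts →
      pvBGo nparts j left rs
        = pvK (if left = [] then (if j = 1 then none else some ',') else some (left.getLastD ' ')) rs := by
  intro rs
  induction rs with
  | nil => intro j left _ _; simp [pvBGo, pvK]
  | cons right rs' ih =>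
    intro j left hj hlen
    rw [show pvBGo nparts j left (right :: rs')
          = pvSepB nparts j left right ++ right ++ pvBGo nparts (j + 1) right rs' from rfl]
    have hlen' : j + (rs'.length : Int) + 1 = nparts := by
      simp only [List.length_cons] at hlen
      push_cast at hlen ⊢
      omega
    rw [ih (j + 1) right (by omega) (by omega)]
    set prev : Option Char := if left = [] then (if j = 1 then none else some ',') else some (left.getLastD ' ') with hprev
    rw [show pvK prev (right :: rs')
          = (if prev = none ∨ (right = [] ∧ rs' = []) then []
             else if PySem.Chars.isdigit (prev.getD ' ') && PySem.Chars.isdigit (right.headD ',') then [',']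
             else [' ', ',', ' ']) ++ right ++ pvK (pvPrevAt (some ',') right) rs' from rfl]
    have hnext : (if right = [] then (if j + 1 = 1 then (none : Option Char) else some ',') else some (right.getLastD ' '))
        = pvPrevAt (some ',') right := by
      have : (j + 1 : Int) ≠ 1 := by omega
      simp [pvPrevAt, this]
    rw [hnext]
    congr 1
    congr 1
    -- pvSepB = the pvK separator
    unfold pvSepB
    have hc1 : ((j = 1 ∧ left = []) ∨ (j = nparts - 1 ∧ right = [])) ↔ (prev = none ∨ (right = [] ∧ rs' = [])) := by
      have hlast : (j = nparts - 1) ↔ rs' = [] := by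
        constructor
        · intro h
          have : (rs'.length : Int) = 0 := by omega
          exact List.eq_nil_of_length_eq_zero (by omega)
        · intro h; subst h; simp at hlen'; omega
      rw [hprev]
      constructor
      · rintro (⟨h1, h2⟩ | ⟨h1, h2⟩)
        · left; simp [h1, h2]
        · right; exact ⟨h2, hlast.mp h1⟩
      · rintro (hnone | ⟨h1, h2⟩)
        · by_cases h2 : left = []
          · by_cases h1 : j = 1
            · exact Or.inl ⟨h1, h2⟩
            · simp [h1, h2] at hnone
          · simp [h2] at hnone
        · exact Or.inr ⟨hlast.mpr h2, h1⟩
    have hc2 : (left ≠ [] ∧ right ≠ [] ∧ PySem.Chars.isdigit (PySem.List.pyGetD left (-1) ' ') = true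
          ∧ PySem.Chars.isdigit (PySem.List.pyGetD right 0 ' ') = true)
        ↔ (PySem.Chars.isdigit (prev.getD ' ') && PySem.Chars.isdigit (right.headD ',')) = true := by
      rw [hprev]
      by_cases hl : left = []
      · simp only [hl]
        constructor
        · rintro ⟨h, _⟩; exact absurd rfl h
        · intro h
          by_cases h1 : j = 1 <;> simp [h1, PySem.Chars.isdigit] at h
      · rw [if_neg hl]
        by_cases hrr : right = []
        · subst hrr
          simp [PySem.Chars.isdigit]
        · rw [pyGetD_neg_one left hl, pyGetD_zero right hrr]
          have : right.headD ' ' = right.headD ',' := by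
            cases right with
            | nil => exact absurd rfl hrr
            | cons q qs => simp
          rw [this]
          simp [hl, hrr]
    by_cases h1 : (j = 1 ∧ left = []) ∨ (j = nparts - 1 ∧ right = [])
    · rw [if_pos h1, if_pos (hc1.mp h1)]
    · rw [if_neg h1, if_neg (fun h => h1 (hc1.mpr h))]
      by_cases h2 : (left ≠ [] ∧ right ≠ [] ∧ PySem.Chars.isdigit (PySem.List.pyGetD left (-1) ' ') = true
          ∧ PySem.Chars.isdigit (PySem.List.pyGetD right 0 ' ') = true)
      · rw [if_pos h2, if_pos (hc2.mp h2)]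
      · rw [if_neg h2, if_neg (fun h => h2 (hc2.mpr h))]

-- ===== VERDICT (by name: the statement is the Claim_ definition above) =====
theorem add_space_around_comma_spec : Claim_equal_add_space_around_comma := by
  intro doc _
  unfold Spec_add_space_around_comma add_space_around_comma add_space_around_comma_alt
  simp only [PySem.Str.len_eq, splitOn_eq_splitP]
  rw [foldl_stepA_eq_reSub, List.nil_append]
  have hA : pvReSub doc.toList ((doc.toList.length : Int)) 0 doc.toList
      = pvSpecGo none doc.toList := by
    simpa using reSub_eq_specGo doc.toList doc.toList 0 le_rfl (by simp)
  rw [hA, specGo_eq_splitP_K doc.toList none]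
  congr 1
  rw [BGo_eq_K _ _ 1 _ le_rfl (by omega)]
  simp [pvPrevAt]
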